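-- pv_equiv track=rewrite | github.com/yubie-re/castleio-gen | castleio/DecodeToken.py | decode_flag_array
-- ===== SOURCE A (Python) =====
-- def decode_flag_array(hex_bytes):
--     if len(hex_bytes) != 2:
--         raise ValueError("Input must be a list of two hexadecimal bytes.")
--     data = (hex_bytes[0] << 8) | hex_bytes[1]
--     binary_converted_num = data & 0x0FFF
--     N = binary_converted_num >> 4
--     binary_str = format(N, '08b')
--     boolean_array = [bit == '1' for bit in binary_str]
--     return binary_converted_num, boolean_array
-- ===== SOURCE B (Python) =====
-- def decode_flag_array(hex_bytes):
--     if len(hex_bytes) != 2: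
--         raise ValueError("Input must be a list of two hexadecimal bytes.")
--     data = (hex_bytes[0] << 8) | hex_bytes[1]
--     binary_converted_num = data & 0x0FFF
--     N = binary_converted_num >> 4
--     boolean_array = [(N >> (7 - i)) & 1 == 1 for i in range(8)]
--     return binary_converted_num, boolean_array
-- ===== Notes on version B (the rewrite author's own statement) =====
-- stated objective: simpler
-- what changed: The flag list is computed by direct arithmetic bit extraction ((N >> (7-i)) & 1) over bit positions instead of formatting N into an 8-character binary string and comparing each character to '1'.
import Mathlib
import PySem

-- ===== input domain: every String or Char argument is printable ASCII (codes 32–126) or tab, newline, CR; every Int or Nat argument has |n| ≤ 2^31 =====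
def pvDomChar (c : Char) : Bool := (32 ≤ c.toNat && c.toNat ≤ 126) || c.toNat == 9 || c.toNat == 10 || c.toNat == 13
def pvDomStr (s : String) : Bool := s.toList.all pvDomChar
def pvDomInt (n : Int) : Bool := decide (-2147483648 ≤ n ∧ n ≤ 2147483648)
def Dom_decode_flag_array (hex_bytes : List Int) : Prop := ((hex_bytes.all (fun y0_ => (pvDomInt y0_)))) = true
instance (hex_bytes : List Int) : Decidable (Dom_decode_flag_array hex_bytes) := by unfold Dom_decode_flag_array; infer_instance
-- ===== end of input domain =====

-- B replaces A's binary-string formatting and character comparison with direct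
-- arithmetic bit extraction; objective: simpler. Both raise on length ≠ 2 (excluded by Pre_).

-- ===== PORT A =====
-- binary digits of n, most significant first (empty for 0) — the digits format(N,'b') produces
def pvBinCharsAux : Nat → Nat → List Char
  | 0, _ => []
  | _+1, 0 => []
  | fuel+1, (n+1) => pvBinCharsAux fuel ((n+1) / 2) ++ [if (n+1) % 2 = 1 then '1' else '0']

def pvBinChars (n : Nat) : List Char := pvBinCharsAux n n

-- format(N, '08b') for N ≥ 0: pad with '0' on the left to width 8 (exact for 0 ≤ N)
def pvFormat08b (n : Int) : List Char :=
  let s := pvBinChars n.toNat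
  List.replicate (8 - s.length) '0' ++ s

def decode_flag_array (hex_bytes : List Int) : Int × List Bool :=
  -- the len(hex_bytes) != 2 check raises in Python; Pre_ excludes those inputs
  let data := PySem.Int.bor ((PySem.List.pyGetD hex_bytes 0 0) <<< (8 : Nat)) (PySem.List.pyGetD hex_bytes 1 0)
  let binary_converted_num := PySem.Int.band data 0x0FFF
  let N := binary_converted_num >>> (4 : Nat)
  let binary_str := pvFormat08b N
  let boolean_array := binary_str.map (fun bit => bit == '1')
  (binary_converted_num, boolean_array)

-- ===== PORT B =====
def decode_flag_array_alt (hex_bytes : List Int) : Int × List Bool :=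
  -- same length check (raises; excluded by Pre_), same arithmetic for data / mask
  let data := PySem.Int.bor ((PySem.List.pyGetD hex_bytes 0 0) <<< (8 : Nat)) (PySem.List.pyGetD hex_bytes 1 0)
  let binary_converted_num := PySem.Int.band data 0x0FFF
  let N := binary_converted_num >>> (4 : Nat)
  let boolean_array := (PySem.List.pyRange 0 8 1).map (fun i => PySem.Int.band (N >>> (7 - i).toNat) 1 == 1)
  (binary_converted_num, boolean_array)

-- ===== PRECONDITION & SPEC =====
-- Pre_: Python A (and B) raise ValueError unless the list has exactly two elements
def Pre_decode_flag_array (hex_bytes : List Int) : Prop := hex_bytes.length = 2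
instance (hex_bytes : List Int) : Decidable (Pre_decode_flag_array hex_bytes) := by unfold Pre_decode_flag_array; infer_instance
def pvWitness_decode_flag_array : List Int := [18, 52]
def Spec_decode_flag_array (hex_bytes : List Int) (out : Int × List Bool) : Prop := out = decode_flag_array_alt hex_bytes
instance (hex_bytes : List Int) (out : Int × List Bool) : Decidable (Spec_decode_flag_array hex_bytes out) := by unfold Spec_decode_flag_array; infer_instance

-- ===== CLAIM (what is proved, stated in full; the proofs are below) =====
def Claim_equal_decode_flag_array : Prop := ∀ (hex_bytes : List Int), Dom_decode_flag_array hex_bytes → Pre_decode_flag_array hex_bytes → Spec_decode_flag_array hex_bytes (decode_flag_array hex_bytes)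

-- ===== LEMMAS AND PROOFS =====

-- x & 0x0FFF is a natural number below 4096, for every Int x
lemma pv_band_mask (x : Int) : ∃ m : Nat, PySem.Int.band x 4095 = (m : Int) ∧ m < 4096 := by
  unfold PySem.Int.band
  split_ifs with h1 h2 h2
  · exact ⟨x.toNat &&& (4095:Int).toNat, rfl, by
      have := Nat.and_le_right (n := x.toNat) (m := (4095:Int).toNat); omega⟩
  · omega
  · exact ⟨(4095:Int).toNat - ((4095:Int).toNat &&& (-x - 1).toNat), rfl, by omega⟩
  · omega

-- the two bit-readouts agree for every N = ↑n with n < 256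
lemma pv_bits_eq : ∀ n : Nat, n < 256 →
    (pvFormat08b ((n : Int))).map (fun bit => bit == '1')
      = (PySem.List.pyRange 0 8 1).map (fun i => PySem.Int.band (((n : Int)) >>> (7 - i).toNat) 1 == 1) := by
  set_option maxRecDepth 8192 in decide

-- ===== VERDICT (by name: the statement is the Claim_ definition above) =====
theorem decode_flag_array_spec : Claim_equal_decode_flag_array := by
  intro hex_bytes _ _
  unfold Spec_decode_flag_array decode_flag_array decode_flag_array_alt
  obtain ⟨m, hm, hmlt⟩ := pv_band_mask
    (PySem.Int.bor ((PySem.List.pyGetD hex_bytes 0 0) <<< (8 : Nat)) (PySem.List.pyGetD hex_bytes 1 0))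
  simp only [hm]
  have hshift : ((m : Int)) >>> (4 : Nat) = ((m >>> 4 : Nat) : Int) := by
    simp [Int.shiftRight_eq, Int.natCast_shiftRight]
  rw [hshift]
  exact congrArg _ (pv_bits_eq (m >>> 4) (by omega))
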